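-- pv_equiv track=rewrite | github.com/AdamZhouSE/pythonHomework | Code/CodeRecords/2356/60715/303122.py | find
-- ===== SOURCE A (Python) =====
-- def find(num):
--     if len(num)<=2:
--         return num[0]
--     for i in range(1,len(num)-1):
--         left=[]
--         right=[]
--         for j in range(i+1):
--             left.append(num[j])
--         for k in range(i,len(num)):
--             right.append(num[k])
--         if num[i]==sorted(left)[len(left)-1] and num[i]==sorted(right)[0]:
--             return num[i]
--     return -1
-- ===== SOURCE B (Python) =====
-- def find(num):
--     n = len(num)
--     if n <= 2:
--         return num[0]
--     # suffix minima, built back to front in O(n)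
--     rsuf = []
--     m = num[n - 1]
--     for k in range(n - 1, -1, -1):
--         m = min(num[k], m)
--         rsuf.append(m)
--     rsuf.reverse()
--     suf = rsuf
--     pmax = num[0]
--     for i in range(1, n - 1):
--         v = num[i]
--         if pmax <= v and v <= suf[i]:
--             return v
--         if pmax < v:
--             pmax = v
--     return -1
-- ===== Notes on version B (the rewrite author's own statement) =====
-- stated objective: faster
-- what changed: A re-sorts the full prefix and suffix at every index (O(n^2 log n)); B precomputes the suffix-minimum array in one backward pass and scans once with a running prefix maximum, returning the first index whose value dominates the prefix and lower-bounds the suffix (O(n)).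
import Mathlib
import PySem

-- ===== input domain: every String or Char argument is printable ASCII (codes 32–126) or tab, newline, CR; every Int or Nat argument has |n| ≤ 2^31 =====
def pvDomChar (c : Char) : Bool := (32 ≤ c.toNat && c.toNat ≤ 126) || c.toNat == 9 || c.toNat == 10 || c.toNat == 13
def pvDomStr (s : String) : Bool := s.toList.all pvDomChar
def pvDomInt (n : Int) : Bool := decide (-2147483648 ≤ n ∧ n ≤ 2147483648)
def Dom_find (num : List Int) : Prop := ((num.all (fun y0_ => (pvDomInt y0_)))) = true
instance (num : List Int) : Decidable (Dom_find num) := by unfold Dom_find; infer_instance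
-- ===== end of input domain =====

-- B replaces A's per-index full sorts of the prefix and suffix by a precomputed
-- suffix-minimum array plus a running prefix maximum: a faster algorithm.

-- ===== PORT A =====
-- A's for-loop with early return, as recursion over the index range
def findLoopA (num : List Int) : List Int → Int
  | [] => -1
  | i :: rest =>
      let left := (PySem.List.pyRange 0 (i + 1) 1).foldl
        (fun acc j => acc ++ [PySem.List.pyGetD num j 0]) []
      let right := (PySem.List.pyRange i (PySem.List.len num) 1).foldl
        (fun acc k => acc ++ [PySem.List.pyGetD num k 0]) []
      if PySem.List.pyGetD num i 0 =
           PySem.List.pyGetD (PySem.List.sorted left (fun x => x) false) (PySem.List.len left - 1) 0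
         ∧ PySem.List.pyGetD num i 0 =
           PySem.List.pyGetD (PySem.List.sorted right (fun x => x) false) 0 0
      then PySem.List.pyGetD num i 0
      else findLoopA num rest

def find (num : List Int) : Int :=
  if PySem.List.len num ≤ 2 then PySem.List.pyGetD num 0 0
  else findLoopA num (PySem.List.pyRange 1 (PySem.List.len num - 1) 1)

-- ===== PORT B =====
-- B's second for-loop with early return, as recursion over the index range
def findLoopB (num suf : List Int) (pmax : Int) : List Int → Int
  | [] => -1
  | i :: rest =>
      let v := PySem.List.pyGetD num i 0
      if pmax ≤ v ∧ v ≤ PySem.List.pyGetD suf i 0 then v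
      else findLoopB num suf (if pmax < v then v else pmax) rest

def find_alt (num : List Int) : Int :=
  let n := PySem.List.len num
  if n ≤ 2 then PySem.List.pyGetD num 0 0
  else
    let st := (PySem.List.pyRange (n - 1) (-1) (-1)).foldl
      (fun (st : Int × List Int) k =>
        let m := min (PySem.List.pyGetD num k 0) st.1
        (m, st.2 ++ [m]))
      (PySem.List.pyGetD num (n - 1) 0, [])
    let suf := st.2.reverse
    findLoopB num suf (PySem.List.pyGetD num 0 0) (PySem.List.pyRange 1 (n - 1) 1)

-- ===== PRECONDITION & SPEC =====
-- Pre_ excludes only the empty list, on which A (num[0]) raises IndexError.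
def Pre_find (num : List Int) : Prop := num ≠ []
instance (num : List Int) : Decidable (Pre_find num) := by unfold Pre_find; infer_instance
def pvWitness_find : List Int := [3, 1, 4, 2, 5]

def Spec_find (num : List Int) (out : Int) : Prop := out = find_alt num
instance (num : List Int) (out : Int) : Decidable (Spec_find num out) := by unfold Spec_find; infer_instance

-- ===== CLAIM (what is proved, stated in full; the proofs are below) =====
def Claim_equal_find : Prop := ∀ (num : List Int), Dom_find num → Pre_find num → Spec_find num (find num)

-- ===== LEMMAS AND PROOFS =====

-- minimum of a nonempty list, as Python's running-min loop computes it
def minD : List Int → Int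
  | [] => 0
  | x :: t => t.foldl min x

lemma foldl_min_eq : ∀ (t : List Int), t ≠ [] → ∀ a : Int, t.foldl min a = min a (minD t) := by
  intro t
  induction t with
  | nil => intro h; exact absurd rfl h
  | cons y s IH =>
    intro _ a
    by_cases hs : s = []
    · subst hs; simp [minD]
    · show s.foldl min (min a y) = min a (minD (y :: s))
      rw [IH hs (min a y), min_assoc]
      have : minD (y :: s) = min y (minD s) := by
        show s.foldl min y = _
        rw [IH hs y]
      rw [this]

lemma minD_cons (x : Int) (t : List Int) (ht : t ≠ []) : minD (x :: t) = min x (minD t) := by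
  show t.foldl min x = _
  rw [foldl_min_eq t ht x]

lemma minD_mem : ∀ (l : List Int), l ≠ [] → minD l ∈ l := by
  intro l
  induction l with
  | nil => intro h; exact absurd rfl h
  | cons x t IH =>
    intro _
    by_cases ht : t = []
    · subst ht; simp [minD]
    · rw [minD_cons x t ht]
      rcases le_total x (minD t) with h | h
      · simp [min_eq_left h]
      · simp [min_eq_right h, IH ht]

lemma minD_le : ∀ (l : List Int) (y : Int), y ∈ l → minD l ≤ y := by
  intro l
  induction l with
  | nil => intro y h; simp at h
  | cons x t IH =>
    intro y hy
    by_cases ht : t = []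
    · subst ht; simp at hy; simp [minD, hy]
    · rw [minD_cons x t ht]
      rcases List.mem_cons.mp hy with h | h
      · subst h; exact min_le_left _ _
      · exact le_trans (min_le_right _ _) (IH y h)

lemma minD_le_iff (l : List Int) (hl : l ≠ []) (v : Int) :
    v ≤ minD l ↔ ∀ y ∈ l, v ≤ y := by
  constructor
  · intro h y hy; exact le_trans h (minD_le l y hy)
  · intro h; exact h _ (minD_mem l hl)

-- sorted(l)[len(l)-1] characterises the maximum
lemma sorted_getD_last_max (l : List Int) (hne : l ≠ []) (x : Int) (hx : x ∈ l) :
    (x = (PySem.List.sorted l (fun y => y) false).getD (l.length - 1) 0) ↔ ∀ y ∈ l, y ≤ x := by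
  have hlen : (PySem.List.sorted l (fun y => y) false).length = l.length :=
    PySem.List.length_sorted ..
  have hpos : 0 < l.length := List.length_pos_iff.mpr hne
  have hidx : l.length - 1 < (PySem.List.sorted l (fun y => y) false).length := by omega
  rw [List.getD_eq_getElem _ _ hidx]
  have hmax : ∀ y ∈ PySem.List.sorted l (fun y => y) false,
      y ≤ (PySem.List.sorted l (fun y => y) false)[l.length - 1] := by
    intro y hy
    obtain ⟨p, hp, rfl⟩ := List.mem_iff_getElem.mp hy
    exact PySem.List.sorted_id_getElem_mono l (by omega) hidx
  have hmem : (PySem.List.sorted l (fun y => y) false)[l.length - 1] ∈ l :=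
    (PySem.List.mem_sorted ..).mp (List.getElem_mem hidx)
  constructor
  · intro h y hy
    rw [h]
    exact hmax y ((PySem.List.mem_sorted ..).mpr hy)
  · intro h
    exact le_antisymm (hmax x ((PySem.List.mem_sorted ..).mpr hx)) (h _ hmem)

-- sorted(l)[0] characterises the minimum
lemma sorted_getD_head_min (l : List Int) (hne : l ≠ []) (x : Int) (hx : x ∈ l) :
    (x = (PySem.List.sorted l (fun y => y) false).getD 0 0) ↔ ∀ y ∈ l, x ≤ y := by
  have hlen : (PySem.List.sorted l (fun y => y) false).length = l.length :=
    PySem.List.length_sorted ..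
  have hpos : 0 < l.length := List.length_pos_iff.mpr hne
  have hidx : 0 < (PySem.List.sorted l (fun y => y) false).length := by omega
  rw [List.getD_eq_getElem _ _ hidx]
  have hmin : ∀ y ∈ PySem.List.sorted l (fun y => y) false,
      (PySem.List.sorted l (fun y => y) false)[0] ≤ y := by
    intro y hy
    obtain ⟨p, hp, rfl⟩ := List.mem_iff_getElem.mp hy
    exact PySem.List.sorted_id_getElem_mono l (Nat.zero_le p) hp
  have hmem : (PySem.List.sorted l (fun y => y) false)[0] ∈ l :=
    (PySem.List.mem_sorted ..).mp (List.getElem_mem hidx)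
  constructor
  · intro h y hy
    rw [h]
    exact hmin y ((PySem.List.mem_sorted ..).mpr hy)
  · intro h
    exact le_antisymm (h _ hmem) (hmin x ((PySem.List.mem_sorted ..).mpr hx))

-- A's first inner loop builds num[0..b-1]
lemma map_pyGetD_range_take (num : List Int) : ∀ (b : Nat), b ≤ num.length →
    (PySem.List.pyRange 0 (b : Int) 1).map (fun j => PySem.List.pyGetD num j 0) = num.take b := by
  intro b
  induction b with
  | zero => intro _; simp [PySem.List.pyRange_one_eq_nil]
  | succ b IH =>
    intro hb
    have hcast : ((b + 1 : Nat) : Int) = (b : Int) + 1 := by push_cast; ring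
    rw [hcast, PySem.List.pyRange_one_succ_right (by positivity), List.map_append,
      IH (by omega), List.take_add_one]
    simp [PySem.List.pyGetD_natCast, List.getElem?_eq_getElem (by omega : b < num.length)]

-- B's backward pass produces the suffix minima
lemma sufFold (num : List Int) : ∀ (j : Nat), j < num.length → ∀ (m : Int),
    min (num.getD j 0) m = minD (num.drop j) → ∀ (acc : List Int),
    ((PySem.List.pyRange (j : Int) (-1) (-1)).foldl
        (fun (st : Int × List Int) k =>
          let m := min (PySem.List.pyGetD num k 0) st.1
          (m, st.2 ++ [m])) (m, acc)).2
      = acc ++ (List.range (j + 1)).map (fun t => minD (num.drop (j - t))) := by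
  intro j
  induction j with
  | zero =>
    intro hj m hm acc
    have h01 : PySem.List.pyRange ((0 : Nat) : Int) (-1) (-1) = [0] := by
      rw [PySem.List.pyRange_neg_one_cons (by omega)]
      norm_num [PySem.List.pyRange_neg_one_eq_nil]
    rw [h01]
    simp only [List.foldl_cons, List.foldl_nil]
    rw [PySem.List.pyGetD_zero]
    simpa [List.getD] using hm
  | succ j IH =>
    intro hj m hm acc
    have hc : ((j + 1 : Nat) : Int) = (j : Int) + 1 := by push_cast; ring
    have hdropne : num.drop (j + 1) ≠ [] := by
      intro h
      have := List.drop_eq_nil_iff.mp h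
      omega
    rw [hc, PySem.List.pyRange_neg_one_cons (by omega : (-1 : Int) < (j : Int) + 1),
      List.foldl_cons]
    have harg : ((j : Int) + 1) - 1 = (j : Int) := by ring
    have hstep : (let m1 := min (PySem.List.pyGetD num ((j : Int) + 1) 0) (m, acc).1
          ((m1, (m, acc).2 ++ [m1]) : Int × List Int))
        = (minD (num.drop (j + 1)), acc ++ [minD (num.drop (j + 1))]) := by
      dsimp only
      rw [← hc, PySem.List.pyGetD_natCast, hm]
    rw [harg, hstep, IH (by omega) (minD (num.drop (j + 1)))
      (by
        rw [List.drop_eq_getElem_cons (by omega : j < num.length),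
          minD_cons _ _ hdropne, List.getD_eq_getElem _ _ (by omega : j < num.length)]) _]
    rw [List.append_assoc, List.singleton_append]
    congr 1
    simp only [List.range_succ_eq_map, List.map_cons, List.map_map]
    simp [Function.comp, Nat.succ_sub_succ]

lemma suf_spec (num : List Int) (h1 : 1 ≤ num.length) (i : Nat) (hi : i < num.length) :
    (((PySem.List.pyRange ((num.length : Int) - 1) (-1) (-1)).foldl
        (fun (st : Int × List Int) k =>
          let m := min (PySem.List.pyGetD num k 0) st.1
          (m, st.2 ++ [m])) (PySem.List.pyGetD num ((num.length : Int) - 1) 0, [])).2.reverse).getD i 0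
      = minD (num.drop i) := by
  have hc : ((num.length : Int) - 1) = ((num.length - 1 : Nat) : Int) := by omega
  have hlt : num.length - 1 < num.length := by omega
  have hsucc : num.length - 1 + 1 = num.length := by omega
  have hd : num.drop (num.length - 1) = [num[num.length - 1]'hlt] := by
    rw [List.drop_eq_getElem_cons hlt, hsucc, List.drop_length]
  have hprem : min (num.getD (num.length - 1) 0) (num.getD (num.length - 1) 0)
      = minD (num.drop (num.length - 1)) := by
    rw [min_self, hd, List.getD_eq_getElem _ _ hlt]; rfl
  rw [hc, PySem.List.pyGetD_natCast,
    sufFold num (num.length - 1) hlt _ hprem [], List.nil_append]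
  have hlen2 : (((List.range (num.length - 1 + 1)).map
      (fun t => minD (num.drop (num.length - 1 - t)))).reverse).length = num.length := by
    simp [hsucc]
  rw [List.getD_eq_getElem _ _ (by rw [hlen2]; exact hi), List.getElem_reverse,
    List.getElem_map, List.getElem_range]
  congr 2
  simp only [List.length_map, List.length_range]
  omega

-- the two loops agree step by step
lemma loopEq (num suf : List Int)
    (hsuf : ∀ i : Nat, i < num.length → suf.getD i 0 = minD (num.drop i)) :
    ∀ (d : Nat) (i0 : Nat) (pmax : Int), 1 ≤ i0 → (i0 : Int) + d = (num.length : Int) - 1 →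
    pmax ∈ num.take i0 → (∀ y ∈ num.take i0, y ≤ pmax) →
    findLoopA num (PySem.List.pyRange (i0 : Int) ((num.length : Int) - 1) 1)
      = findLoopB num suf pmax (PySem.List.pyRange (i0 : Int) ((num.length : Int) - 1) 1) := by
  intro d
  induction d with
  | zero =>
    intro i0 pmax h1 hsum hmem hub
    rw [PySem.List.pyRange_one_eq_nil (by omega)]
    rfl
  | succ d IH =>
    intro i0 pmax h1 hsum hmem hub
    have hi0lt : i0 < num.length := by omega
    have hi1le : i0 + 1 ≤ num.length := by omega
    have hvl : PySem.List.pyGetD num (i0 : Int) 0 = num.getD i0 0 := PySem.List.pyGetD_natCast ..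
    have hgetD : num.getD i0 0 = num[i0] := List.getD_eq_getElem _ _ hi0lt
    have hc1 : ((i0 : Int) + 1) = ((i0 + 1 : Nat) : Int) := by push_cast; ring
    have hleft : (PySem.List.pyRange 0 ((i0 : Int) + 1) 1).foldl
        (fun acc j => acc ++ [PySem.List.pyGetD num j 0]) [] = num.take (i0 + 1) := by
      rw [PySem.List.foldl_append_singleton_eq_map, List.nil_append, hc1,
        map_pyGetD_range_take num (i0 + 1) hi1le]
    have hright : (PySem.List.pyRange (i0 : Int) (PySem.List.len num) 1).foldl
        (fun acc k => acc ++ [PySem.List.pyGetD num k 0]) [] = num.drop i0 := by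
      rw [PySem.List.foldl_append_singleton_eq_map, List.nil_append,
        PySem.List.map_pyGetD_pyRange num 0 (by positivity)]
      simp
    have hlentake : (num.take (i0 + 1)).length = i0 + 1 := by
      simp [List.length_take]; omega
    have hlenleft : PySem.List.len (num.take (i0 + 1)) - 1 = ((i0 : Nat) : Int) := by
      rw [PySem.List.len_eq, hlentake]; push_cast; ring
    have htakene : num.take (i0 + 1) ≠ [] := by
      intro h
      have := congrArg List.length h
      rw [hlentake] at this
      simp at this
    have hdropne : num.drop i0 ≠ [] := by
      intro h
      rw [List.drop_eq_nil_iff] at h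
      omega
    have hxtake : num[i0] ∈ num.take (i0 + 1) := by
      have h' : i0 < (num.take (i0 + 1)).length := by omega
      have : (num.take (i0 + 1))[i0]'h' = num[i0] := List.getElem_take
      rw [← this]
      exact List.getElem_mem _
    have hxdrop : num[i0] ∈ num.drop i0 := by
      rw [List.drop_eq_getElem_cons hi0lt]
      exact List.mem_cons_self ..
    have htake1 : num.take (i0 + 1) = num.take i0 ++ [num[i0]] := by
      rw [List.take_add_one]
      simp [List.getElem?_eq_getElem hi0lt]
    have hCA1 : (num[i0] = (PySem.List.sorted (num.take (i0 + 1)) (fun y => y) false).getD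
        ((num.take (i0 + 1)).length - 1) 0) ↔ ∀ y ∈ num.take (i0 + 1), y ≤ num[i0] :=
      sorted_getD_last_max _ htakene _ hxtake
    have hCA2 : (num[i0] = (PySem.List.sorted (num.drop i0) (fun y => y) false).getD 0 0)
        ↔ ∀ y ∈ num.drop i0, num[i0] ≤ y :=
      sorted_getD_head_min _ hdropne _ hxdrop
    have hBmax : (pmax ≤ num[i0]) ↔ ∀ y ∈ num.take (i0 + 1), y ≤ num[i0] := by
      constructor
      · intro h y hy
        rw [htake1] at hy
        rcases List.mem_append.mp hy with h' | h'
        · exact le_trans (hub y h') h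
        · simp at h'
          omega
      · intro h
        exact h pmax (by rw [htake1]; exact List.mem_append_left _ hmem)
    have hBmin : (num[i0] ≤ suf.getD i0 0) ↔ ∀ y ∈ num.drop i0, num[i0] ≤ y := by
      rw [hsuf i0 hi0lt]
      exact minD_le_iff _ hdropne _
    rw [PySem.List.pyRange_one_cons (by omega : (i0 : Int) < (num.length : Int) - 1)]
    rw [findLoopA, findLoopB]
    simp only [hleft, hright, hvl, hgetD, hlenleft, PySem.List.pyGetD_natCast,
      PySem.List.pyGetD_zero]
    rw [hlentake, Nat.add_sub_cancel] at hCA1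
    have hCAB : (num[i0] = (PySem.List.sorted (num.take (i0 + 1)) (fun x => x) false).getD i0 0 ∧
        num[i0] = (PySem.List.sorted (num.drop i0) (fun x => x) false).getD 0 0)
        ↔ (pmax ≤ num[i0] ∧ num[i0] ≤ suf.getD i0 0) := by
      rw [hCA1, hCA2, hBmax, hBmin]
    by_cases h : pmax ≤ num[i0] ∧ num[i0] ≤ suf.getD i0 0
    · rw [if_pos (hCAB.mpr h), if_pos h]
    · rw [if_neg (fun c => h (hCAB.mp c)), if_neg h, hc1]
      have hmem' : (if pmax < num[i0] then num[i0] else pmax) ∈ num.take (i0 + 1) := by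
        split_ifs with hlt
        · exact hxtake
        · rw [htake1]
          exact List.mem_append_left _ hmem
      have hub' : ∀ y ∈ num.take (i0 + 1), y ≤ (if pmax < num[i0] then num[i0] else pmax) := by
        intro y hy
        rw [htake1] at hy
        rcases List.mem_append.mp hy with h' | h'
        · have := hub y h'
          split_ifs with hlt <;> omega
        · simp at h'
          split_ifs with hlt <;> omega
      exact IH (i0 + 1) _ (by omega) (by omega) hmem' hub' 

-- ===== VERDICT (by name: the statement is the Claim_ definition above) =====
theorem find_spec : Claim_equal_find := by
  intro num _ hpre
  have hne : num ≠ [] := hpre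
  have h1 : 0 < num.length := List.length_pos_iff.mpr hne
  unfold Spec_find find find_alt
  simp only [PySem.List.len_eq]
  by_cases h2 : (num.length : Int) ≤ 2
  · rw [if_pos h2, if_pos h2]
  · rw [if_neg h2, if_neg h2]
    have h3 : 3 ≤ num.length := by omega
    have hg0 : PySem.List.pyGetD num 0 0 = num[0]'h1 := by
      rw [PySem.List.pyGetD_zero, List.getD_eq_getElem _ _ h1]
    have htake1 : num.take 1 = [num[0]'h1] := by
      rw [List.take_add_one]
      simp [List.getElem?_eq_getElem h1]
    have hmem : PySem.List.pyGetD num 0 0 ∈ num.take 1 := by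
      rw [hg0, htake1]
      exact List.mem_singleton.mpr rfl
    have hub : ∀ y ∈ num.take 1, y ≤ PySem.List.pyGetD num 0 0 := by
      intro y hy
      rw [htake1] at hy
      simp at hy
      rw [hg0, hy]
    have hsuf := suf_spec num (by omega)
    have := loopEq num _ hsuf (num.length - 2) 1 (PySem.List.pyGetD num 0 0)
      (le_refl 1) (by omega) hmem hub
    simpa using this
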